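-- pv_equiv track=rewrite | github.com/ErenPy/twitter-sentiment-analysis | Utils.py | url_remover
-- ===== SOURCE A (Python) =====
-- def url_remover(tweet):
--     new_tweet = []
--     for words in tweet:
--         is_url = False
--         pattern_count = 0
--         for letters in words:
--             if letters == 'c' or letters == 'o' or letters == 'm' or letters == '.':
--                 pattern_count += 1
--                 if pattern_count == 4:
--                     is_url = True
--                     break
--             else:
--                 pattern_count = 0
--         if not is_url:
--             new_tweet.append(words)
--     return new_tweet
-- ===== SOURCE B (Python) =====
-- import re
--
-- _PAT = re.compile(r'[com.]{4}')
--
-- def url_remover(tweet):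
--     return [w for w in tweet if _PAT.search(w) is None]
-- ===== Notes on version B (the rewrite author's own statement) =====
-- stated objective: idiomatic
-- what changed: Replaced the hand-written per-character consecutive-run state machine with a precompiled regex test [com.]{4} inside a list comprehension.
import Mathlib
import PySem

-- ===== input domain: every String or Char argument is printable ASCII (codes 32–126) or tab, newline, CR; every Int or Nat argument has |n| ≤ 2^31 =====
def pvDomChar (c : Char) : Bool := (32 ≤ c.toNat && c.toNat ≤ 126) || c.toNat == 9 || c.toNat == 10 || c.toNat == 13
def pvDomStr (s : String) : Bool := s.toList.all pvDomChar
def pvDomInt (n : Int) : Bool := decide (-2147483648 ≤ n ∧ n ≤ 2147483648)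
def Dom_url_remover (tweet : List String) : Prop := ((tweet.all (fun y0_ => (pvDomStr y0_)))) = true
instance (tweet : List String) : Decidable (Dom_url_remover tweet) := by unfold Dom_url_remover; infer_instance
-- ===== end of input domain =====

-- B replaces A's hand-written per-character consecutive-counter state machine with a
-- regex test [com.]{4} inside a list comprehension; same outputs (idiomatic rewrite).

-- ===== PORT A =====
-- the character is one of 'c','o','m','.'
def pvOk (c : Char) : Bool := c == 'c' || c == 'o' || c == 'm' || c == '.'

-- A's inner loop: scan the characters keeping pattern_count, break (true) when it reaches 4
def pvScanA : List Char → Nat → Bool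
  | [], _ => false
  | c :: rest, cnt =>
      if pvOk c then
        if cnt + 1 == 4 then true else pvScanA rest (cnt + 1)
      else pvScanA rest 0

def url_remover (tweet : List String) : List String :=
  tweet.foldl (fun new_tweet words =>
    if pvScanA words.toList 0 then new_tweet else new_tweet ++ [words]) []

-- ===== PORT B =====
-- regex match attempt at the current position: the next 4 characters all match [com.]
def pvPref : List Char → Nat → Bool
  | _, 0 => true
  | [], _ + 1 => false
  | c :: r, k + 1 => pvOk c && pvPref r k

-- re.search(r'[com.]{4}', w): try a match at each position, left to right (exact for this pattern)
def pvSearch4 : List Char → Bool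
  | [] => false
  | c :: r => pvPref (c :: r) 4 || pvSearch4 r

def url_remover_alt (tweet : List String) : List String :=
  tweet.filter (fun w => !pvSearch4 w.toList)

-- ===== PRECONDITION & SPEC =====
def Spec_url_remover (tweet : List String) (out : List String) : Prop := out = url_remover_alt tweet
instance (tweet : List String) (out : List String) : Decidable (Spec_url_remover tweet out) := by unfold Spec_url_remover; infer_instance

-- ===== CLAIM (what is proved, stated in full; the proofs are below) =====
def Claim_equal_url_remover : Prop := ∀ (tweet : List String), Dom_url_remover tweet → Spec_url_remover tweet (url_remover tweet)

-- ===== LEMMAS AND PROOFS =====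

theorem pvPref_mono (l : List Char) : ∀ j k : Nat, j ≤ k → pvPref l k = true → pvPref l j = true := by
  induction l with
  | nil =>
    intro j k hjk h
    cases k with
    | zero => cases Nat.le_zero.mp hjk; exact h
    | succ k => simp [pvPref] at h
  | cons c r ih =>
    intro j k hjk h
    cases j with
    | zero => rfl
    | succ j =>
      cases k with
      | zero => omega
      | succ k =>
        simp [pvPref] at h ⊢
        exact ⟨h.1, ih j k (by omega) h.2⟩

theorem pvPref_search (l : List Char) (h : pvPref l 4 = true) : pvSearch4 l = true := by
  cases l with
  | nil => simp [pvPref] at h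
  | cons c r => simp [pvSearch4, h]

-- characterisation of A's inner state machine via B's match attempts
theorem pvScanA_eq (l : List Char) : ∀ cnt : Nat, cnt ≤ 3 →
    pvScanA l cnt = (pvPref l (4 - cnt) || pvSearch4 l) := by
  induction l with
  | nil =>
    intro cnt h
    cases h4 : 4 - cnt with
    | zero => omega
    | succ k => simp [pvScanA, pvSearch4, pvPref]
  | cons c r ih =>
    intro cnt h
    by_cases hc : pvOk c = true
    · by_cases h3 : cnt = 3
      · subst h3
        have : pvScanA (c :: r) 3 = true := by simp [pvScanA, hc]
        rw [this]
        have : pvPref (c :: r) (4 - 3) = true := by simp [pvPref, hc]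
        rw [this]; simp
      · have step : pvScanA (c :: r) cnt = pvScanA r (cnt + 1) := by
          simp only [pvScanA, hc, if_true]
          have : (cnt + 1 == 4) = false := by
            simp only [beq_eq_false_iff_ne]; omega
          rw [this]; rfl
        have h42 : (4 : Nat) - (cnt + 1) = 3 - cnt := by omega
        rw [step, ih (cnt + 1) (by omega), h42]
        have h41 : 4 - cnt = (3 - cnt) + 1 := by omega
        rw [h41]
        show (pvPref r (3 - cnt) || pvSearch4 r)
            = ((pvOk c && pvPref r (3 - cnt)) || pvSearch4 (c :: r))
        have hp4 : pvSearch4 (c :: r) = ((pvOk c && pvPref r 3) || pvSearch4 r) := rfl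
        rw [hp4, hc]
        simp only [Bool.true_and]
        cases hpr : pvPref r (3 - cnt) with
        | true => simp
        | false =>
          simp only [Bool.false_or]
          cases hp3 : pvPref r 3 with
          | true =>
            exact absurd (pvPref_mono r (3 - cnt) 3 (by omega) hp3) (by simp [hpr])
          | false => simp
    · have step : pvScanA (c :: r) cnt = pvScanA r 0 := by
        simp [pvScanA, hc]
      have hpc : pvPref (c :: r) (4 - cnt) = false := by
        have h4 : 4 - cnt = (3 - cnt) + 1 := by omega
        rw [h4]; simp [pvPref, hc]
      have hs : pvSearch4 (c :: r) = pvSearch4 r := by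
        have h0 : pvPref (c :: r) 4 = false := by simp [pvPref, hc]
        simp [pvSearch4, h0]
      rw [step, ih 0 (by omega), hpc, hs]
      simp only [Bool.false_or, Nat.sub_zero]
      cases hp4 : pvPref r 4 with
      | true => simp [pvPref_search r hp4]
      | false => simp

theorem pvScanA_eq_search (l : List Char) : pvScanA l 0 = pvSearch4 l := by
  rw [pvScanA_eq l 0 (by omega)]
  cases hp : pvPref l 4 with
  | true => simp [pvPref_search l hp]
  | false => simp

-- ===== VERDICT (by name: the statement is the Claim_ definition above) =====
theorem url_remover_spec : Claim_equal_url_remover := by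
  intro tweet _
  show url_remover tweet = url_remover_alt tweet
  unfold url_remover url_remover_alt
  have hfun : (fun (new_tweet : List String) words =>
      if pvScanA words.toList 0 then new_tweet else new_tweet ++ [words])
      = (fun new_tweet words => if (!pvScanA words.toList 0) then new_tweet ++ [words] else new_tweet) := by
    funext a w; cases pvScanA w.toList 0 <;> simp
  rw [hfun, PySem.List.foldl_append_if_eq_filter]
  simp only [List.nil_append]
  congr 1
  funext w
  rw [pvScanA_eq_search]
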